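-- pv_equiv track=rewrite | github.com/GustavoRodri1213/Curso-Codarme-Python | questão_2_função.py | tupla
-- ===== SOURCE A (Python) =====
-- def tupla(lista):
--     maior = 0
--     resultado = ()
--     for numero in lista:
--         if numero > maior:
--             maior = numero
--             posicao = lista.index(maior)
--             resultado = (posicao,maior)
--     return resultado
-- ===== SOURCE B (Python) =====
-- def tupla(lista):
--     if not lista:
--         return ()
--     m = max(lista)
--     return (lista.index(m), m) if m > 0 else ()
-- ===== Notes on version B (the rewrite author's own statement) =====
-- stated objective: faster
-- what changed: Replaces the running-max loop that recomputes lista.index inside the update branch by a direct max(lista) plus one lista.index(m) lookup, guarded by the empty list and m > 0.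
import Mathlib
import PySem

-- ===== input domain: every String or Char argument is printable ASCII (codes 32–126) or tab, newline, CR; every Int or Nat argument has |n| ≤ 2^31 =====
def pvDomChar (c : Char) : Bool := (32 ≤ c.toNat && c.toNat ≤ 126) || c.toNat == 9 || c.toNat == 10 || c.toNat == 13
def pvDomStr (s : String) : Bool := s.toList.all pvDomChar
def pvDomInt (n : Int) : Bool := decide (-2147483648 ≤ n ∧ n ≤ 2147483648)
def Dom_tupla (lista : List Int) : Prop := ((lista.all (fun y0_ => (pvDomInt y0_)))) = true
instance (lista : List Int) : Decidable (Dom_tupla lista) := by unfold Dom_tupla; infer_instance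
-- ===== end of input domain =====

-- B replaces A's running-max loop (which recomputes lista.index inside the update branch)
-- by a direct max(lista) and one index lookup; objective: faster (O(n^2) -> O(n)).
-- Python tuples () / (p, m) are encoded as the lists [] / [p, m].

-- ===== PORT A =====
-- lista.index(maior) can never raise here since maior was just read from lista,
-- so the total form (index? …).getD 0 is exact.
def tupla (lista : List Int) : List Int :=
  (lista.foldl (fun (st : Int × List Int) numero =>
      if numero > st.1 then
        (numero, [(((PySem.List.index? lista numero).getD 0 : Nat) : Int), numero])
      else st) (0, [])).2

-- ===== PORT B =====
def tupla_alt (lista : List Int) : List Int :=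
  match PySem.List.max? lista (fun x => x) with
  | none => []
  | some m =>
      if m > 0 then [(((PySem.List.index? lista m).getD 0 : Nat) : Int), m] else []

-- ===== PRECONDITION & SPEC =====
def Spec_tupla (lista : List Int) (out : List Int) : Prop := out = tupla_alt lista
instance (lista : List Int) (out : List Int) : Decidable (Spec_tupla lista out) := by unfold Spec_tupla; infer_instance

-- ===== CLAIM (what is proved, stated in full; the proofs are below) =====
def Claim_equal_tupla : Prop := ∀ (lista : List Int), Dom_tupla lista → Spec_tupla lista (tupla lista)

-- ===== LEMMAS AND PROOFS =====

-- canonical state of A's loop as a function of the current running max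
def pvRep (L : List Int) (M : Int) : List Int :=
  if 0 < M then [(((PySem.List.index? L M).getD 0 : Nat) : Int), M] else []

theorem pvFold_inv (L : List Int) (s : List Int) (M : Int) (hM : 0 ≤ M) :
    s.foldl (fun (st : Int × List Int) numero =>
      if numero > st.1 then
        (numero, [(((PySem.List.index? L numero).getD 0 : Nat) : Int), numero])
      else st) (M, pvRep L M)
    = (s.foldl max M, pvRep L (s.foldl max M)) := by
  induction s generalizing M with
  | nil => simp
  | cons x t ih =>
      simp only [List.foldl_cons]
      by_cases h : x > M
      · have hx : max M x = x := by omega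
        have hrep : pvRep L x
            = [(((PySem.List.index? L x).getD 0 : Nat) : Int), x] := by
          simp [pvRep, show (0:Int) < x by omega]
        rw [show (if x > M then
              ((x : Int), [(((PySem.List.index? L x).getD 0 : Nat) : Int), x])
            else (M, pvRep L M)) = (x, pvRep L x) by simp [h, hrep], hx]
        exact ih x (by omega)
      · have hx : max M x = M := by omega
        rw [show (if x > M then
              ((x : Int), [(((PySem.List.index? L x).getD 0 : Nat) : Int), x])
            else (M, pvRep L M)) = (M, pvRep L M) by simp [h], hx]
        exact ih M hM

theorem pvFoldMax_comm (t : List Int) (a b : Int) :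
    t.foldl max (max a b) = max a (t.foldl max b) := by
  induction t generalizing b with
  | nil => rfl
  | cons x t ih => simp only [List.foldl_cons, max_assoc]; exact ih (max b x)

theorem pvTupla_eq (L : List Int) : tupla L = pvRep L (L.foldl max 0) := by
  unfold tupla
  have h := pvFold_inv L L 0 le_rfl
  rw [show (pvRep L 0) = ([] : List Int) from rfl] at h
  rw [h]

-- ===== VERDICT (by name: the statement is the Claim_ definition above) =====
theorem tupla_spec : Claim_equal_tupla := by
  intro lista _
  show tupla lista = tupla_alt lista
  rw [pvTupla_eq]
  unfold tupla_alt
  cases lista with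
  | nil => rfl
  | cons x t =>
      rw [PySem.List.max?_id_cons]
      simp only [List.foldl_cons, pvFoldMax_comm t 0 x]
      by_cases hm : 0 < t.foldl max x
      · simp [pvRep, hm, show max 0 (t.foldl max x) = t.foldl max x by omega]
      · simp [pvRep, hm, show ¬ (0 : Int) < max 0 (t.foldl max x) by omega]
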